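-- pv_equiv track=rewrite | github.com/rgary87/python_linear_regression | neural_network.py | get_higher_index
-- ===== SOURCE A (Python) =====
-- def get_higher_index(tab: []):
--     val = 0
--     index = -1
--     for i in range(len(tab)):
--         if val < tab[i]:
--             val = tab[i]
--             index = i
--     return index
-- ===== SOURCE B (Python) =====
-- def get_higher_index(tab):
--     m = max(tab, default=0)
--     if m > 0:
--         return tab.index(m)
--     return -1
-- ===== Notes on version B (the rewrite author's own statement) =====
-- stated objective: idiomatic
-- what changed: Replaces A's single fused scan tracking running max and its index with two separate passes: max(tab, default=0) to find the maximum, then tab.index(m) to locate its first occurrence (gated by m > 0).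
import Mathlib
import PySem

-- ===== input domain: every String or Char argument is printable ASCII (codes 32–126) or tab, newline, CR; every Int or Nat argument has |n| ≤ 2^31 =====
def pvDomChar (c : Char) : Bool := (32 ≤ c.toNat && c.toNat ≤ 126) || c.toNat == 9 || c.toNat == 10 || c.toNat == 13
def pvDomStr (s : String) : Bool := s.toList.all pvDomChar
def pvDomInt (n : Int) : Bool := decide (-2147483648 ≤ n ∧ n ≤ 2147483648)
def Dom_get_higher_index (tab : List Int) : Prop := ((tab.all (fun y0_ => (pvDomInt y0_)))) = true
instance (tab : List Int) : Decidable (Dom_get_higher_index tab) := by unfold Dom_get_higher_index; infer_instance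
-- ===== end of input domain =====

-- B finds max(tab, default=0) in one pass, then its first index in a second pass; same O(n), plainer decomposition.

-- ===== PORT A =====
-- the for-loop over range(len(tab)): structural recursion over the list carrying the index i and state (val, index)
def getHigherLoop : List Int → Int → Int → Int → Int
  | [], _, _, index => index
  | x :: xs, i, val, index =>
    if val < x then getHigherLoop xs (i + 1) x i
    else getHigherLoop xs (i + 1) val index

def get_higher_index (tab : List Int) : Int := getHigherLoop tab 0 0 (-1)

-- ===== PORT B =====
def get_higher_index_alt (tab : List Int) : Int :=
  let m := (PySem.List.max? tab (fun y => y)).getD 0   -- max(tab, default=0)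
  if 0 < m then
    match PySem.List.index? tab m with                 -- tab.index(m); never none here since m > 0 → m ∈ tab
    | some k => (k : Int)
    | none => -1
  else -1

-- ===== PRECONDITION & SPEC =====
def Spec_get_higher_index (tab : List Int) (out : Int) : Prop := out = get_higher_index_alt tab
instance (tab : List Int) (out : Int) : Decidable (Spec_get_higher_index tab out) := by unfold Spec_get_higher_index; infer_instance

-- ===== CLAIM (what is proved, stated in full; the proofs are below) =====
def Claim_equal_get_higher_index : Prop := ∀ (tab : List Int), Dom_get_higher_index tab → Spec_get_higher_index tab (get_higher_index tab)

-- ===== LEMMAS AND PROOFS =====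

lemma foldl_max_pull (t : List Int) : ∀ (a b : Int), t.foldl max (max a b) = max a (t.foldl max b) := by
  induction t with
  | nil => intro a b; simp
  | cons y t ih =>
    intro a b
    simp only [List.foldl_cons]
    rw [max_assoc, ih]

-- A's loop result, characterised by the max of the remaining list and the first index of that max
lemma loop_eq (xs : List Int) : ∀ (i val index : Int),
    getHigherLoop xs i val index =
      match PySem.List.max? xs (fun y => y) with
      | none => index
      | some m => if val < m then i + ((PySem.List.index? xs m).getD 0 : Nat) else index := by
  induction xs with
  | nil => intro i val index; simp [getHigherLoop, PySem.List.max?]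
  | cons x xs ih =>
    intro i val index
    rw [PySem.List.max?_id_cons]
    cases hxs : xs with
    | nil =>
      simp only [getHigherLoop, List.foldl_nil]
      split_ifs with h
      · simp
      · rfl
    | cons y t =>
      rw [← hxs]
      have hmx : PySem.List.max? xs (fun y => y) = some (t.foldl max y) := by
        rw [hxs, PySem.List.max?_id_cons]
      have hmem : t.foldl max y ∈ xs := PySem.List.max?_mem hmx
      have hM : xs.foldl max x = max x (t.foldl max y) := by
        rw [hxs]; simp only [List.foldl_cons]; exact foldl_max_pull t x y
      set m' : Int := t.foldl max y with hm'
      obtain ⟨k, hk⟩ : ∃ k, PySem.List.index? xs m' = some k :=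
        Option.isSome_iff_exists.mp ((PySem.List.index?_isSome_iff xs m').2 hmem)
      simp only [getHigherLoop]
      by_cases h : val < x
      · -- val < x : state becomes (x, i)
        rw [if_pos h, ih (i + 1) x i, hmx, hM]
        by_cases hx : x < m'
        · have hne : x ≠ m' := ne_of_lt hx
          have hidx := PySem.List.index?_cons_of_ne xs hne
          rw [max_eq_right (le_of_lt hx)]
          have hvm : val < m' := lt_trans h hx
          simp only [hx, if_true, hk, hidx, Option.map_some, Option.getD_some, hvm]
          push_cast; ring
        · have hxm : max x m' = x := max_eq_left (le_of_not_gt hx)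
          rw [hxm]
          simp only [hx, if_false, h, if_true, PySem.List.index?_cons_self,
            Option.getD_some, Nat.cast_zero, add_zero]
      · -- x ≤ val : state unchanged
        rw [if_neg h, ih (i + 1) val index, hmx, hM]
        have hxle : x ≤ val := le_of_not_gt h
        by_cases hv : val < m'
        · have hxm' : x < m' := lt_of_le_of_lt hxle hv
          have hne : x ≠ m' := ne_of_lt hxm'
          have hidx := PySem.List.index?_cons_of_ne xs hne
          rw [max_eq_right (le_of_lt hxm')]
          simp only [hv, if_true, hk, hidx, Option.map_some, Option.getD_some]
          push_cast; ring
        · have hnv : ¬ val < max x m' := by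
            rcases max_cases x m' with ⟨he, _⟩ | ⟨he, _⟩ <;> rw [he]
            · exact not_lt_of_ge hxle
            · exact hv
          simp only [hv, if_false, hnv, if_false]

-- ===== VERDICT (by name: the statement is the Claim_ definition above) =====
theorem get_higher_index_spec : Claim_equal_get_higher_index := by
  intro tab _
  unfold Spec_get_higher_index get_higher_index get_higher_index_alt
  rw [loop_eq]
  cases hmx : PySem.List.max? tab (fun y => y) with
  | none => simp
  | some m =>
    have hmem : m ∈ tab := PySem.List.max?_mem hmx
    obtain ⟨k, hk⟩ : ∃ k, PySem.List.index? tab m = some k :=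
      Option.isSome_iff_exists.mp ((PySem.List.index?_isSome_iff tab m).2 hmem)
    simp only [Option.getD_some, hk]
    split_ifs with h <;> simp
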